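-- pv_equiv track=rewrite | github.com/ercintorun/As_path_range_to_regexp_list | as_path_range_to_regexp_list.py | genRangeRegex
-- ===== SOURCE A (Python) =====
-- def regexRangeDigits(start,stop):
--   if start == stop:
--     return str(start)
--   return '[%d-%d]' % (start,stop)
--
-- def genRangeRegex(start, end):
--   if start <= 0:
--     raise ValueError('only ranges of positive numbers supported')
--
--   if start >= end:
--     return []
--
--   digitsStart = str(start)
--   digitsEnd   = str(end)
--   lastDigitStart = start%10
--
--   if start//10 == (end-1)//10: # integer division
--     lastDigitStop = (end-1)%10
--     regexAll = digitsStart[:-1] + regexRangeDigits(lastDigitStart,lastDigitStop)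
--     return [regexAll]
--
--   regexListStart = [] # at most one regular expression for going up to first multiple of 10
--   if lastDigitStart != 0:
--     regexStart = digitsStart[:-1] + regexRangeDigits(lastDigitStart,9)
--     regexListStart.append(regexStart)
--
--   regexListEnd = [] # at most one regular expression for going up from last multiple of 10
--   lastDigitEnd = end%10
--   if lastDigitEnd != 0:
--     regexEnd = digitsEnd[:-1] + regexRangeDigits(0,lastDigitEnd-1)
--     regexListEnd.append(regexEnd)
--
--   regexListMidTrunc = genRangeRegex((start+9)//10, end//10)
--   regexListMid = [r+'[0-9]' for r in regexListMidTrunc]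
--
--   return regexListStart + regexListMid + regexListEnd
-- ===== SOURCE B (Python) =====
-- def regexRangeDigits(start, stop):
--   if start == stop:
--     return str(start)
--   return '[%d-%d]' % (start, stop)
--
-- def genRangeRegex(start, end):
--   if start <= 0:
--     raise ValueError('only ranges of positive numbers supported')
--   low, high = start, end
--   suffix = ''
--   lows = []
--   highs = []
--   while low < high:
--     if low // 10 == (high - 1) // 10:
--       mid = str(low)[:-1] + regexRangeDigits(low % 10, (high - 1) % 10) + suffix
--       return lows + [mid] + highs[::-1]
--     if low % 10 != 0:
--       lows.append(str(low)[:-1] + regexRangeDigits(low % 10, 9) + suffix)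
--     if high % 10 != 0:
--       highs.append(str(high)[:-1] + regexRangeDigits(0, high % 10 - 1) + suffix)
--     suffix = '[0-9]' + suffix
--     low = (low + 9) // 10
--     high = high // 10
--   return lows + highs[::-1]
-- ===== Notes on version B (the rewrite author's own statement) =====
-- stated objective: alternative
-- what changed: Replaced the recursion on (start+9)//10, end//10 with a single explicit while-loop that peels one decimal digit per iteration, maintaining a growing '[0-9]' suffix plus separate low-side and high-side accumulator lists (the high side reversed at the end).
import Mathlib
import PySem

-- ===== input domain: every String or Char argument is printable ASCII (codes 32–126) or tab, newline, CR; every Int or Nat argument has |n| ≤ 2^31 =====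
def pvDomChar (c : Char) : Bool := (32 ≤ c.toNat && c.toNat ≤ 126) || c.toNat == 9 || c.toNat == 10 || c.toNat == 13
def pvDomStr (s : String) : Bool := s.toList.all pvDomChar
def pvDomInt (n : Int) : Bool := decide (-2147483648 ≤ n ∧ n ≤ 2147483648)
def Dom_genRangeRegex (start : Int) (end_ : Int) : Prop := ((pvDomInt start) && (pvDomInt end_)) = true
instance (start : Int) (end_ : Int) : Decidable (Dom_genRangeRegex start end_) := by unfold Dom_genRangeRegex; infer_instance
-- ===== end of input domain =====

-- B replaces A's recursion by one explicit digit-peeling loop with a growing '[0-9]' suffix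
-- and low-/high-side accumulators (objective: alternative decomposition, same cost).

-- ===== PORT A =====
-- '%d' formatting of '[%d-%d]' ported by hand as string concatenation with PySem.Int.toStr (exact for ints)
def regexRangeDigits (start : Int) (stop : Int) : String :=
  if start = stop then PySem.Int.toStr start
  else "[" ++ PySem.Int.toStr start ++ "-" ++ PySem.Int.toStr stop ++ "]"

def genRangeRegex (start : Int) (end_ : Int) : List String :=
  if _h0 : start ≤ 0 then []   -- Python raises ValueError here; excluded by Pre_genRangeRegex
  else if _h1 : start ≥ end_ then []
  else
    let digitsStart := PySem.Int.toStr start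
    let digitsEnd := PySem.Int.toStr end_
    let lastDigitStart := PySem.Int.mod start 10
    if PySem.Int.floordiv start 10 = PySem.Int.floordiv (end_ - 1) 10 then
      let lastDigitStop := PySem.Int.mod (end_ - 1) 10
      [PySem.Str.slice digitsStart none (some (-1)) ++ regexRangeDigits lastDigitStart lastDigitStop]
    else
      let regexListStart :=
        if lastDigitStart ≠ 0 then
          [PySem.Str.slice digitsStart none (some (-1)) ++ regexRangeDigits lastDigitStart 9]
        else []
      let lastDigitEnd := PySem.Int.mod end_ 10
      let regexListEnd :=
        if lastDigitEnd ≠ 0 then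
          [PySem.Str.slice digitsEnd none (some (-1)) ++ regexRangeDigits 0 (lastDigitEnd - 1)]
        else []
      let regexListMidTrunc := genRangeRegex (PySem.Int.floordiv (start + 9) 10) (PySem.Int.floordiv end_ 10)
      let regexListMid := regexListMidTrunc.map (fun r => r ++ "[0-9]")
      regexListStart ++ regexListMid ++ regexListEnd
termination_by (end_ - start).toNat
decreasing_by
  rw [PySem.Int.floordiv_eq_ediv_of_pos (a := start + 9) (by omega),
      PySem.Int.floordiv_eq_ediv_of_pos (a := end_) (by omega)]
  omega

-- ===== PORT B =====
def genLoop (low : Int) (high : Int) (suffix : String) (lows : List String) (highs : List String) : List String :=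
  if _h : low < high then
    if PySem.Int.floordiv low 10 = PySem.Int.floordiv (high - 1) 10 then
      let mid := PySem.Str.slice (PySem.Int.toStr low) none (some (-1)) ++
                 regexRangeDigits (PySem.Int.mod low 10) (PySem.Int.mod (high - 1) 10) ++ suffix
      lows ++ [mid] ++ highs.reverse
    else
      let lows' :=
        if PySem.Int.mod low 10 ≠ 0 then
          lows ++ [PySem.Str.slice (PySem.Int.toStr low) none (some (-1)) ++
                   regexRangeDigits (PySem.Int.mod low 10) 9 ++ suffix]
        else lows
      let highs' :=
        if PySem.Int.mod high 10 ≠ 0 then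
          highs ++ [PySem.Str.slice (PySem.Int.toStr high) none (some (-1)) ++
                    regexRangeDigits 0 (PySem.Int.mod high 10 - 1) ++ suffix]
        else highs
      genLoop (PySem.Int.floordiv (low + 9) 10) (PySem.Int.floordiv high 10) ("[0-9]" ++ suffix) lows' highs'
  else
    lows ++ highs.reverse
termination_by (high - low).toNat
decreasing_by
  rw [PySem.Int.floordiv_eq_ediv_of_pos (a := low + 9) (by omega),
      PySem.Int.floordiv_eq_ediv_of_pos (a := high) (by omega)]
  omega

def genRangeRegex_alt (start : Int) (end_ : Int) : List String :=
  if start ≤ 0 then []   -- Python raises ValueError here; excluded by Pre_genRangeRegex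
  else genLoop start end_ "" [] []

-- ===== PRECONDITION & SPEC =====
-- Pre_ excludes exactly the inputs where the Python A raises ValueError (start <= 0).
def Pre_genRangeRegex (start : Int) (end_ : Int) : Prop := 0 < start
instance (start : Int) (end_ : Int) : Decidable (Pre_genRangeRegex start end_) := by unfold Pre_genRangeRegex; infer_instance
def pvWitness_genRangeRegex : Int × Int := (7, 123)

def Spec_genRangeRegex (start : Int) (end_ : Int) (out : List String) : Prop := out = genRangeRegex_alt start end_
instance (start : Int) (end_ : Int) (out : List String) : Decidable (Spec_genRangeRegex start end_ out) := by unfold Spec_genRangeRegex; infer_instance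

-- ===== CLAIM (what is proved, stated in full; the proofs are below) =====
def Claim_equal_genRangeRegex : Prop := ∀ (start : Int) (end_ : Int), Dom_genRangeRegex start end_ → Pre_genRangeRegex start end_ → Spec_genRangeRegex start end_ (genRangeRegex start end_)

-- ===== LEMMAS AND PROOFS =====

-- Loop invariant: with low ≥ 1, the loop computes lows ++ (A's result, each with suffix appended) ++ highs.reverse
theorem genLoop_eq (n : Nat) : ∀ (low high : Int), (high - low).toNat ≤ n → 0 < low →
    ∀ (suffix : String) (lows highs : List String),
    genLoop low high suffix lows highs =
      lows ++ (genRangeRegex low high).map (fun r => r ++ suffix) ++ highs.reverse := by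
  induction n with
  | zero =>
    intro low high hn hlow suffix lows highs
    rw [genLoop, genRangeRegex]
    simp [show ¬ low < high by omega, show ¬ low ≤ 0 by omega, show low ≥ high by omega]
  | succ n ih =>
    intro low high hn hlow suffix lows highs
    rw [genLoop]
    by_cases hlt : low < high
    · rw [genRangeRegex]
      have e1 : PySem.Int.floordiv low 10 = low / 10 := PySem.Int.floordiv_eq_ediv_of_pos (by omega)
      have e2 : PySem.Int.floordiv (high - 1) 10 = (high - 1) / 10 := PySem.Int.floordiv_eq_ediv_of_pos (by omega)
      have e3 : PySem.Int.floordiv (low + 9) 10 = (low + 9) / 10 := PySem.Int.floordiv_eq_ediv_of_pos (by omega)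
      have e4 : PySem.Int.floordiv high 10 = high / 10 := PySem.Int.floordiv_eq_ediv_of_pos (by omega)
      simp only [dif_neg (by omega : ¬ low ≤ 0), dif_neg (by omega : ¬ low ≥ high), dif_pos hlt,
        e1, e2, e3, e4]
      by_cases hdec : low / 10 = (high - 1) / 10
      · simp [hdec]
      · rw [if_neg hdec, if_neg hdec]
        have hrec := ih ((low + 9) / 10) (high / 10) (by omega) (by omega) ("[0-9]" ++ suffix)
        rw [hrec]
        simp only [List.map_append, List.map_map]
        by_cases h1 : low % 10 = 0 <;> by_cases h2 : high % 10 = 0 <;>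
          simp [h1, h2, Function.comp_def, String.append_assoc, List.append_assoc]
    · rw [genRangeRegex]
      simp [hlt, show ¬ low ≤ 0 by omega, show low ≥ high by omega]

-- ===== VERDICT (by name: the statement is the Claim_ definition above) =====
theorem genRangeRegex_spec : Claim_equal_genRangeRegex := by
  intro start end_ _hdom hpre
  unfold Pre_genRangeRegex at hpre
  unfold Spec_genRangeRegex genRangeRegex_alt
  rw [if_neg (by omega : ¬ start ≤ 0)]
  rw [genLoop_eq (end_ - start).toNat start end_ le_rfl hpre]
  simp
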